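-- pv_equiv track=rewrite | github.com/ddoddii/algorithm | python/Problems/skct/problem3.py | solution
-- ===== SOURCE A (Python) =====
-- def solution(acts):
--     answer = []
--     back = []
--     front = []
--     curr = 0
--     idx = 0
--     for act in acts:
--         # 페이지 이동
--         if act[0] == 0:
--             while act[1] > 0:
--                 idx += 1
--                 back.append(curr)
--                 curr = idx
--                 act[1] -= 1
--             front = []
--             answer.append(curr)
--
--         # 뒤로 가기
--         if act[0] == -1:
--             while act[1] > 0:
--                 if back:
--                     front.append(curr)
--                     curr = back.pop()
--                     act[1] -= 1
--                 else:
--                     act[1] -= 1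
--             answer.append(curr)
--
--         # 앞으로 가기
--         if act[0] == 1:
--             while act[1] > 0:
--                 if front:
--                     back.append(curr)
--                     curr = front.pop()
--                     act[1] -= 1
--                 else:
--                     act[1] -= 1
--             answer.append(curr)
--     return answer
-- ===== SOURCE B (Python) =====
-- # B: single history list + integer cursor instead of two stacks; closed-form
-- # max/min cursor arithmetic instead of one-step while loops.
-- # Note: A mutates each act in place (sets act[1] to 0); B does not mutate acts.
-- def solution(acts):
--     answer = []
--     history = [0]
--     pos = 0
--     idx = 0
--     for act in acts:
--         op = act[0]
--         if op == 0:
--             n = act[1]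
--             del history[pos + 1:]
--             if n > 0:
--                 history.extend(range(idx + 1, idx + n + 1))
--                 idx += n
--                 pos += n
--             answer.append(history[pos])
--         elif op == -1:
--             n = act[1]
--             if n > 0:
--                 pos = max(pos - n, 0)
--             answer.append(history[pos])
--         elif op == 1:
--             n = act[1]
--             if n > 0:
--                 pos = min(pos + n, len(history) - 1)
--             answer.append(history[pos])
--     return answer
-- ===== Notes on version B (the rewrite author's own statement) =====
-- stated objective: alternative
-- what changed: Replaces A's two back/front stacks and one-step while loops with a single history list plus an integer cursor moved by closed-form max/min arithmetic (B also does not mutate the acts argument, while A zeroes each act[1]).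
import Mathlib
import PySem

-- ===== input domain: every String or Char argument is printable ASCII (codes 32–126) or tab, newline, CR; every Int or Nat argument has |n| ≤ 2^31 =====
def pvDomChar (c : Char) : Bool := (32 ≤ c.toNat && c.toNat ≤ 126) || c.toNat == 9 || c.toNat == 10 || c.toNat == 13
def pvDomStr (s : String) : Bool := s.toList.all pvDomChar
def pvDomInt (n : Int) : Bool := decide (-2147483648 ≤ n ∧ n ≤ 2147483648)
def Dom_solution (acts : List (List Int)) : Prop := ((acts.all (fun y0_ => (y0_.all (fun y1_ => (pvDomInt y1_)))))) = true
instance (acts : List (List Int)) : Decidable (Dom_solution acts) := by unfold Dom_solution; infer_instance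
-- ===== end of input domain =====

-- B replaces A's two stacks with one history list and a cursor, using closed-form
-- max/min cursor arithmetic instead of A's one-step while loops; only the return
-- value is compared: A mutates each act in place (act[1] is set to 0), B does not.

-- ===== PORT A =====
-- stacks are Lean lists with head = top of the Python list (append/pop at the end);
-- each Python while loop decrements act[1] every iteration, so it is ported as
-- structural recursion on the (toNat) fuel.
def loopMoveA : Nat → Int → Int → List Int → Int × Int × List Int
  | 0, idx, curr, back => (idx, curr, back)
  | n + 1, idx, curr, back => loopMoveA n (idx + 1) (idx + 1) (curr :: back)

def loopBackA : Nat → Int → List Int → List Int → Int × List Int × List Int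
  | 0, curr, back, front => (curr, back, front)
  | n + 1, curr, back, front =>
    match back with
    | [] => loopBackA n curr [] front
    | b :: bs => loopBackA n b bs (curr :: front)

def loopFrontA : Nat → Int → List Int → List Int → Int × List Int × List Int
  | 0, curr, back, front => (curr, back, front)
  | n + 1, curr, back, front =>
    match front with
    | [] => loopFrontA n curr back []
    | f :: fs => loopFrontA n f (curr :: back) fs

-- state: (answer, back, front, curr, idx)
def stepA (st : List Int × List Int × List Int × Int × Int) (act : List Int) :
    List Int × List Int × List Int × Int × Int :=
  let (answer, back, front, curr, idx) := st
  let op := act.getD 0 0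
  if op = 0 then
    let r := loopMoveA (act.getD 1 0).toNat idx curr back
    (answer ++ [r.2.1], r.2.2, ([] : List Int), r.2.1, r.1)
  else if op = -1 then
    let r := loopBackA (act.getD 1 0).toNat curr back front
    (answer ++ [r.1], r.2.1, r.2.2, r.1, idx)
  else if op = 1 then
    let r := loopFrontA (act.getD 1 0).toNat curr back front
    (answer ++ [r.1], r.2.1, r.2.2, r.1, idx)
  else st

def solution (acts : List (List Int)) : List Int :=
  (acts.foldl stepA ([], [], [], 0, 0)).1

-- ===== PORT B =====
-- state: (answer, history, pos, idx); pos is the cursor (always 0 ≤ pos < |history|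
-- in Python, so Nat here, and Nat subtraction realizes Python's max(pos - n, 0)).
def stepB (st : List Int × List Int × Nat × Int) (act : List Int) :
    List Int × List Int × Nat × Int :=
  let (answer, history, pos, idx) := st
  let op := act.getD 0 0
  if op = 0 then
    let n := act.getD 1 0
    let h := history.take (pos + 1)
    if n > 0 then
      let h' := h ++ (List.range n.toNat).map (fun k : Nat => idx + 1 + (k : Int))
      (answer ++ [h'.getD (pos + n.toNat) 0], h', pos + n.toNat, idx + n)
    else
      (answer ++ [h.getD pos 0], h, pos, idx)
  else if op = -1 then
    let n := act.getD 1 0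
    let pos' := if n > 0 then pos - n.toNat else pos
    (answer ++ [history.getD pos' 0], history, pos', idx)
  else if op = 1 then
    let n := act.getD 1 0
    let pos' := if n > 0 then min (pos + n.toNat) (history.length - 1) else pos
    (answer ++ [history.getD pos' 0], history, pos', idx)
  else st

def solution_alt (acts : List (List Int)) : List Int :=
  (acts.foldl stepB ([], [0], 0, 0)).1

-- ===== PRECONDITION & SPEC =====
-- Pre_ excludes exactly the inputs on which A raises IndexError: an action list
-- that is empty, or whose first element is 0/-1/1 while it has no second element.
def Pre_solution (acts : List (List Int)) : Prop :=
  List.Forall (fun a : List Int =>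
    (a.getD 0 0 = 0 ∨ a.getD 0 0 = -1 ∨ a.getD 0 0 = 1) → 2 ≤ a.length) acts
instance (acts : List (List Int)) : Decidable (Pre_solution acts) := by unfold Pre_solution; infer_instance
def pvWitness_solution : List (List Int) := [[0, 2], [-1, 1], [1, 1], [0, 1], [5]]
def Spec_solution (acts : List (List Int)) (out : List Int) : Prop := out = solution_alt acts
instance (acts : List (List Int)) (out : List Int) : Decidable (Spec_solution acts out) := by unfold Spec_solution; infer_instance

-- ===== CLAIM (what is proved, stated in full; the proofs are below) =====
def Claim_equal_solution : Prop := ∀ (acts : List (List Int)), Dom_solution acts → Pre_solution acts → Spec_solution acts (solution acts)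

-- ===== LEMMAS AND PROOFS =====

-- abstraction: B's state as a function of A's state
def absState (s : List Int × List Int × List Int × Int × Int) : List Int × List Int × Nat × Int :=
  (s.1, s.2.1.reverse ++ s.2.2.2.1 :: s.2.2.1, s.2.1.length, s.2.2.2.2)

lemma getD_len (xs : List Int) (c : Int) (f : List Int) (d : Int) :
    (xs ++ c :: f).getD xs.length d = c := by
  simp [List.getD_eq_getElem?_getD]

lemma take_len_succ (xs : List Int) (c : Int) (f : List Int) :
    (xs ++ c :: f).take (xs.length + 1) = xs ++ [c] := by
  simp [List.take_append]

lemma range_map_succ (n : Nat) (idx : Int) :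
    (List.range (n + 1)).map (fun k : Nat => idx + 1 + (k : Int))
      = (idx + 1) :: (List.range n).map (fun k : Nat => (idx + 1) + 1 + (k : Int)) := by
  rw [List.range_succ_eq_map, List.map_cons, List.map_map]
  refine congrArg₂ _ (by norm_num) ?_
  apply List.map_congr_left
  intro k _
  simp only [Function.comp_apply, Nat.succ_eq_add_one]
  push_cast; ring

lemma loopMove_spec (n : Nat) : ∀ (idx curr : Int) (back : List Int),
    (loopMoveA n idx curr back).2.2.reverse ++ [(loopMoveA n idx curr back).2.1]
      = back.reverse ++ curr :: (List.range n).map (fun k : Nat => idx + 1 + (k : Int))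
    ∧ (loopMoveA n idx curr back).1 = idx + n
    ∧ (loopMoveA n idx curr back).2.2.length = back.length + n := by
  induction n with
  | zero => intro idx curr back; simp [loopMoveA]
  | succ n ih =>
    intro idx curr back
    obtain ⟨h1, h2, h3⟩ := ih (idx + 1) (idx + 1) (curr :: back)
    have hun : loopMoveA (n + 1) idx curr back = loopMoveA n (idx + 1) (idx + 1) (curr :: back) := rfl
    refine ⟨?_, ?_, ?_⟩
    · rw [hun, h1, range_map_succ]; simp
    · rw [hun, h2]; push_cast; ring
    · rw [hun, h3]; simp; omega

lemma loopBack_spec (n : Nat) : ∀ (curr : Int) (back front : List Int),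
    (loopBackA n curr back front).2.1.reverse
        ++ (loopBackA n curr back front).1 :: (loopBackA n curr back front).2.2
      = back.reverse ++ curr :: front
    ∧ (loopBackA n curr back front).2.1.length = back.length - n := by
  induction n with
  | zero => intro curr back front; simp [loopBackA]
  | succ n ih =>
    intro curr back front
    match back with
    | [] =>
      obtain ⟨h1, h2⟩ := ih curr [] front
      exact ⟨h1, by simpa using h2⟩
    | b :: bs =>
      obtain ⟨h1, h2⟩ := ih b bs (curr :: front)
      have hun : loopBackA (n + 1) curr (b :: bs) front = loopBackA n b bs (curr :: front) := rfl
      refine ⟨?_, ?_⟩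
      · rw [hun, h1]; simp
      · rw [hun, h2]; simp

lemma loopFront_spec (n : Nat) : ∀ (curr : Int) (back front : List Int),
    (loopFrontA n curr back front).2.1.reverse
        ++ (loopFrontA n curr back front).1 :: (loopFrontA n curr back front).2.2
      = back.reverse ++ curr :: front
    ∧ (loopFrontA n curr back front).2.1.length = back.length + min n front.length := by
  induction n with
  | zero => intro curr back front; simp [loopFrontA]
  | succ n ih =>
    intro curr back front
    match front with
    | [] =>
      obtain ⟨h1, h2⟩ := ih curr back []
      exact ⟨h1, by simpa using h2⟩
    | f :: fs =>
      obtain ⟨h1, h2⟩ := ih f (curr :: back) fs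
      have hun : loopFrontA (n + 1) curr back (f :: fs) = loopFrontA n f (curr :: back) fs := rfl
      refine ⟨?_, ?_⟩
      · rw [hun, h1]; simp
      · rw [hun, h2]; simp; omega

lemma step_comm (s : List Int × List Int × List Int × Int × Int) (act : List Int) :
    stepB (absState s) act = absState (stepA s act) := by
  obtain ⟨ans, back, front, curr, idx⟩ := s
  by_cases h0 : act.getD 0 0 = 0
  · -- page move
    obtain ⟨m1, m2, m3⟩ := loopMove_spec (act.getD 1 0).toNat idx curr back
    have htake : (back.reverse ++ curr :: front).take (back.length + 1)
        = back.reverse ++ [curr] := by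
      have h := take_len_succ back.reverse curr front
      rw [List.length_reverse] at h
      exact h
    by_cases hpos : act.getD 1 0 > 0
    · have hh' : (back.reverse ++ [curr]) ++ (List.range (act.getD 1 0).toNat).map
            (fun k : Nat => idx + 1 + (k : Int))
          = (loopMoveA (act.getD 1 0).toNat idx curr back).2.2.reverse
            ++ [(loopMoveA (act.getD 1 0).toNat idx curr back).2.1] := by
        rw [m1]; simp
      have hgd : ((loopMoveA (act.getD 1 0).toNat idx curr back).2.2.reverse
            ++ [(loopMoveA (act.getD 1 0).toNat idx curr back).2.1]).getD
              (back.length + (act.getD 1 0).toNat) 0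
          = (loopMoveA (act.getD 1 0).toNat idx curr back).2.1 := by
        have h := getD_len (loopMoveA (act.getD 1 0).toNat idx curr back).2.2.reverse
          (loopMoveA (act.getD 1 0).toNat idx curr back).2.1 [] 0
        rw [List.length_reverse, m3] at h
        exact h
      simp only [stepB, stepA, absState, if_pos h0, if_pos hpos, Prod.mk.injEq]
      refine ⟨?_, ?_, ?_, ?_⟩
      · rw [htake, hh', hgd]
      · rw [htake, hh']
      · rw [m3]
      · rw [m2]; omega
    · have hz : (act.getD 1 0).toNat = 0 := by omega
      have hg : (back.reverse ++ [curr]).getD back.length 0 = curr := by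
        have h := getD_len back.reverse curr [] 0
        rw [List.length_reverse] at h
        exact h
      simp only [stepB, stepA, absState, if_pos h0, if_neg hpos, hz, loopMoveA]
      rw [htake, hg]
  · by_cases h1 : act.getD 0 0 = -1
    · obtain ⟨b1, b2⟩ := loopBack_spec (act.getD 1 0).toNat curr back front
      have hpos' : (if act.getD 1 0 > 0 then back.length - (act.getD 1 0).toNat
          else back.length) = back.length - (act.getD 1 0).toNat := by
        by_cases hp : act.getD 1 0 > 0
        · rw [if_pos hp]
        · rw [if_neg hp]; omega
      have hgd : (back.reverse ++ curr :: front).getD (back.length - (act.getD 1 0).toNat) 0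
          = (loopBackA (act.getD 1 0).toNat curr back front).1 := by
        rw [← b1, ← b2]
        have h := getD_len (loopBackA (act.getD 1 0).toNat curr back front).2.1.reverse
          (loopBackA (act.getD 1 0).toNat curr back front).1
          (loopBackA (act.getD 1 0).toNat curr back front).2.2 0
        rw [List.length_reverse] at h
        exact h
      simp only [stepB, stepA, absState, if_neg h0, if_pos h1]
      rw [hpos', hgd, ← b2, ← b1]
    · by_cases h2 : act.getD 0 0 = 1
      · obtain ⟨f1, f2⟩ := loopFront_spec (act.getD 1 0).toNat curr back front
        have hpos' : (if act.getD 1 0 > 0 then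
              min (back.length + (act.getD 1 0).toNat) ((back.reverse ++ curr :: front).length - 1)
            else back.length) = back.length + min (act.getD 1 0).toNat front.length := by
          have hlen : (back.reverse ++ curr :: front).length
              = back.length + 1 + front.length := by
            simp only [List.length_append, List.length_reverse, List.length_cons]
            omega
          rw [hlen]
          by_cases hp : act.getD 1 0 > 0
          · rw [if_pos hp]; omega
          · rw [if_neg hp]; omega
        have hgd : (back.reverse ++ curr :: front).getD
              (back.length + min (act.getD 1 0).toNat front.length) 0
            = (loopFrontA (act.getD 1 0).toNat curr back front).1 := by
          rw [← f1, ← f2]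
          have h := getD_len (loopFrontA (act.getD 1 0).toNat curr back front).2.1.reverse
            (loopFrontA (act.getD 1 0).toNat curr back front).1
            (loopFrontA (act.getD 1 0).toNat curr back front).2.2 0
          rw [List.length_reverse] at h
          exact h
        simp only [stepB, stepA, absState, if_neg h0, if_neg h1, if_pos h2]
        rw [hpos', hgd, ← f2, ← f1]
      · simp only [stepB, stepA, absState, if_neg h0, if_neg h1, if_neg h2]

lemma foldl_comm (acts : List (List Int)) :
    ∀ s, acts.foldl stepB (absState s) = absState (acts.foldl stepA s) := by
  induction acts with
  | nil => intro s; rfl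
  | cons a t ih => intro s; simp only [List.foldl_cons, step_comm, ih]

-- ===== VERDICT (by name: the statement is the Claim_ definition above) =====
theorem solution_spec : Claim_equal_solution := by
  intro acts _ _
  unfold Spec_solution solution solution_alt
  have h : (([], [0], 0, 0) : List Int × List Int × Nat × Int)
      = absState ([], [], [], 0, 0) := rfl
  rw [h, foldl_comm]
  rfl
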